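-- pv_equiv track=rewrite | github.com/Zemheri25/python-exercises | dicting_values.py | liste
-- ===== SOURCE A (Python) =====
-- def liste(list1):
--     dict1 = {}
--     for i in list1:
--         if i not in dict1:
--             dict1[i] = [i]
--         else:
--             dict1[i] += [i]
--     return list(dict1.values())
-- ===== SOURCE B (Python) =====
-- def liste(list1):
--     keys = list(dict.fromkeys(list1))
--     return [[x for x in list1 if x == k] for k in keys]
-- ===== Notes on version B (the rewrite author's own statement) =====
-- stated objective: simpler
-- what changed: Replaces the single-pass dict accumulation with first computing the distinct keys in first-occurrence order and then gathering each group by a per-key filter over the list.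
import Mathlib
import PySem

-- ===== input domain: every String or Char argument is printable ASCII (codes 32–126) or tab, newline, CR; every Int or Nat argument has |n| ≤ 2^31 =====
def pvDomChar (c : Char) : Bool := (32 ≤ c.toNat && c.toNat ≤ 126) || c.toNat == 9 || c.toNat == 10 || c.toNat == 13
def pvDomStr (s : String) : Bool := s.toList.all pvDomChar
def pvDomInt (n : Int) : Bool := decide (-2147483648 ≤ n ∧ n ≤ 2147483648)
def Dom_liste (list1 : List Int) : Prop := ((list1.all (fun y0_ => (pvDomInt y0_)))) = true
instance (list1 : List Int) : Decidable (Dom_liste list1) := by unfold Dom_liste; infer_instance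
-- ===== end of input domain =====

-- B groups equal elements by first computing the distinct keys in first-occurrence
-- order and then filtering the list once per key (simpler decomposition, not faster).

-- ===== PORT A =====
-- the for-loop accumulating into dict1, then list(dict1.values())
def liste (list1 : List Int) : List (List Int) :=
  (list1.foldl
    (fun d i =>
      if d.contains i = false then d.insert i [i]
      else d.insert i (d.getD i [] ++ [i]))
    PySem.Dict.empty).values

-- ===== PORT B =====
-- keys = list(dict.fromkeys(list1)); [[x for x in list1 if x == k] for k in keys]
def liste_alt (list1 : List Int) : List (List Int) :=
  (PySem.List.dedup list1).map (fun k => list1.filter (fun x => x == k))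

-- ===== PRECONDITION & SPEC =====
def Spec_liste (list1 : List Int) (out : List (List Int)) : Prop := out = liste_alt list1
instance (list1 : List Int) (out : List (List Int)) : Decidable (Spec_liste list1 out) := by unfold Spec_liste; infer_instance

-- ===== CLAIM (what is proved, stated in full; the proofs are below) =====
def Claim_equal_liste : Prop := ∀ (list1 : List Int), Dom_liste list1 → Spec_liste list1 (liste list1)

-- ===== LEMMAS AND PROOFS =====

-- A's loop step, with the insert pulled outside the branch
theorem liste_step_eq :
    (fun (d : PySem.Dict Int (List Int)) (i : Int) =>
      if d.contains i = false then d.insert i [i]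
      else d.insert i (d.getD i [] ++ [i]))
    = (fun d i => d.insert i (if d.contains i = false then [i] else d.getD i [] ++ [i])) := by
  funext d i
  split <;> rfl

-- value stored for k after A's loop: previous group ++ occurrences of k in l
theorem liste_loop_getD (l : List Int) (d : PySem.Dict Int (List Int)) (k : Int) :
    (l.foldl (fun d i => d.insert i (if d.contains i = false then [i] else d.getD i [] ++ [i])) d).getD k []
      = d.getD k [] ++ l.filter (fun x => x == k) := by
  induction l generalizing d with
  | nil => simp
  | cons i t ih =>
    simp only [List.foldl_cons, List.filter_cons, ih]
    rw [PySem.Dict.getD_insert]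
    by_cases hik : k = i
    · subst hik
      by_cases hc : d.contains k = false
      · simp [hc, PySem.Dict.getD_of_not_contains d ([] : List Int) hc]
      · simp [hc]
    · have hbeq : (i == k) = false := beq_eq_false_iff_ne.mpr (fun h => hik h.symm)
      simp [hik, hbeq]

theorem liste_eq_alt (l : List Int) : liste l = liste_alt l := by
  unfold liste liste_alt
  rw [liste_step_eq]
  have hnd : (l.foldl (fun d i => d.insert i (if d.contains i = false then [i] else d.getD i [] ++ [i])) PySem.Dict.empty).keys.Nodup :=
    PySem.Dict.nodup_keys_foldl_insert l _ _ PySem.Dict.nodup_keys_empty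
  rw [PySem.Dict.values_eq_map_keys _ hnd []]
  rw [PySem.Dict.keys_foldl_insert]
  simp only [PySem.Dict.keys_empty]
  have hk : PySem.Set.update ([] : List Int) l = PySem.List.dedup l := by
    simp [PySem.List.dedup_eq_ofList, PySem.Set.ofList, PySem.Set.update, PySem.Set.empty]
  rw [hk]
  exact List.map_congr_left (fun k _ => by rw [liste_loop_getD]; simp)

-- ===== VERDICT (by name: the statement is the Claim_ definition above) =====
theorem liste_spec : Claim_equal_liste := by
  intro l _
  exact liste_eq_alt l
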